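-- pv_equiv track=rewrite | github.com/joniuz/generate-music | mgen.py | build_scale
-- ===== SOURCE A (Python) =====
-- NAME_TO_SEMITONE = {
--     "C":0,"C#":1,"Db":1,"D":2,"D#":3,"Eb":3,"E":4,"Fb":4,"E#":5,"F":5,"F#":6,"Gb":6,
--     "G":7,"G#":8,"Ab":8,"A":9,"A#":10,"Bb":10,"B":11,"Cb":11,"B#":0
-- }
--
-- def midi_number(note_name: str, octave: int) -> int:
--     # MIDI: C4=60; C-1=0
--     return 12 * (octave + 1) + NAME_TO_SEMITONE[note_name]
--
-- SCALE_PATTERNS = {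
--     "major":              [2,2,1,2,2,2,1],  # Major
--     "minorN":             [2,1,2,2,1,2,2],  # Natural minor
--     "minorH":             [2,1,2,2,1,3,1],  # Harmonic minor
--     "minorM":             [2,1,2,2,2,2,1],  # Melodic minor asc
--     "pentamajor":         [2,2,3,2,3],      # Pentatonic major
--     "pentaminor":         [3,2,2,3,2],      # Pentatonic minor
--     "bluesminor":         [3,2,1,1,3,2],    # Blues minor
--     "ionian":             [2,2,1,2,2,2,1],  # Ionian
--     "dorian":             [2,1,2,2,2,1,2],  # Dorian
--     "phrygian":           [1,2,2,2,1,2,2],  # Phrygian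
--     "lydian":             [2,2,2,1,2,2,1],  # Lydian
--     "mixolydian":         [2,2,1,2,2,1,2],  # Mixolydean
--     "aeolian":            [2,1,2,2,1,2,2],  # Aeolidian
--     "locrian":            [1,2,2,1,2,2,2],  # Locrian
-- }
--
-- def build_scale(root: str, octave: int, scale: str, degrees: int = 8, prefer_sharps=True):
--     if scale not in SCALE_PATTERNS:
--         raise ValueError(f"Unknown scale '{scale}'. Available: {list(SCALE_PATTERNS.keys())}")
--     current = midi_number(root, octave)
--     pattern = SCALE_PATTERNS[scale]
--     result = [current]
--     step_idx = 0
--     for deg in range(2, degrees + 1):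
--         current += pattern[step_idx % len(pattern)]
--         result.append(current)
--         step_idx += 1
--     return result
-- ===== SOURCE B (Python) =====
-- LETTER_SEMITONE = {"C": 0, "D": 2, "E": 4, "F": 5, "G": 7, "A": 9, "B": 11}
--
-- SCALE_OFFSETS = {
--     "major":      [0, 2, 4, 5, 7, 9, 11],
--     "minorN":     [0, 2, 3, 5, 7, 8, 10],
--     "minorH":     [0, 2, 3, 5, 7, 8, 11],
--     "minorM":     [0, 2, 3, 5, 7, 9, 11],
--     "pentamajor": [0, 2, 4, 7, 9],
--     "pentaminor": [0, 3, 5, 7, 10],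
--     "bluesminor": [0, 3, 5, 6, 7, 10],
--     "ionian":     [0, 2, 4, 5, 7, 9, 11],
--     "dorian":     [0, 2, 3, 5, 7, 9, 10],
--     "phrygian":   [0, 1, 3, 5, 7, 8, 10],
--     "lydian":     [0, 2, 4, 6, 7, 9, 11],
--     "mixolydian": [0, 2, 4, 5, 7, 9, 10],
--     "aeolian":    [0, 2, 3, 5, 7, 8, 10],
--     "locrian":    [0, 1, 3, 5, 6, 8, 10],
-- }
--
--
-- def _root_semitone(root):
--     s = LETTER_SEMITONE[root[0]]
--     if len(root) > 1:
--         s += 1 if root[1] == "#" else -1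
--     return s % 12
--
--
-- def build_scale(root, octave, scale, degrees=8, prefer_sharps=True):
--     offsets = SCALE_OFFSETS[scale]
--     base = 12 * (octave + 1) + _root_semitone(root)
--     L = len(offsets)
--     return [base + 12 * (i // L) + offsets[i % L] for i in range(max(1, degrees))]
-- ===== Notes on version B (the rewrite author's own statement) =====
-- stated objective: alternative
-- what changed: Replaces A's running accumulator over interval patterns by a table of per-scale semitone offsets within one octave plus divmod indexing (note i = base + 12*(i//L) + offsets[i%L], valid because every pattern sums to 12), and computes the root's semitone from its letter and accidental instead of the 21-entry note-name table.
import Mathlib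
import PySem

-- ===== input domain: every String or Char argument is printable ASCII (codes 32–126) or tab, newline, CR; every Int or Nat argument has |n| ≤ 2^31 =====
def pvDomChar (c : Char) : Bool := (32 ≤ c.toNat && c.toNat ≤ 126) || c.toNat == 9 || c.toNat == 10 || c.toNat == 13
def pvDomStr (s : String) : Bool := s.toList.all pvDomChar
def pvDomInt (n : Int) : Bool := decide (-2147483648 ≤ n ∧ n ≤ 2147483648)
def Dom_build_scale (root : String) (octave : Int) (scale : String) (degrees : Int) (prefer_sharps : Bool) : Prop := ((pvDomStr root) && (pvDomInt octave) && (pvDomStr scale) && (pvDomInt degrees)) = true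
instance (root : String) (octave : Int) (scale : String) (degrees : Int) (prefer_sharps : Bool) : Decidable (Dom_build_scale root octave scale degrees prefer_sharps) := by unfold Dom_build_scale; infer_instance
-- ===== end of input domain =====

-- B replaces the running interval accumulator by a per-scale table of semitone offsets within one
-- octave plus divmod indexing, and derives the root's semitone from letter + accidental instead of
-- the note-name table (objective: alternative, same cost); return value only, nothing is mutated.

-- ===== PORT A =====
def pvNAME : PySem.Dict String Int := PySem.Dict.ofList
  [("C",0),("C#",1),("Db",1),("D",2),("D#",3),("Eb",3),("E",4),("Fb",4),("E#",5),("F",5),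
   ("F#",6),("Gb",6),("G",7),("G#",8),("Ab",8),("A",9),("A#",10),("Bb",10),("B",11),("Cb",11),("B#",0)]

def midi_number (note_name : String) (octave : Int) : Int :=
  12 * (octave + 1) + PySem.Dict.getD pvNAME note_name 0

def pvPATTERNS : PySem.Dict String (List Int) := PySem.Dict.ofList
  [("major",[2,2,1,2,2,2,1]),("minorN",[2,1,2,2,1,2,2]),("minorH",[2,1,2,2,1,3,1]),
   ("minorM",[2,1,2,2,2,2,1]),("pentamajor",[2,2,3,2,3]),("pentaminor",[3,2,2,3,2]),
   ("bluesminor",[3,2,1,1,3,2]),("ionian",[2,2,1,2,2,2,1]),("dorian",[2,1,2,2,2,1,2]),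
   ("phrygian",[1,2,2,2,1,2,2]),("lydian",[2,2,2,1,2,2,1]),("mixolydian",[2,2,1,2,2,1,2]),
   ("aeolian",[2,1,2,2,1,2,2]),("locrian",[1,2,2,1,2,2,2])]

def build_scale (root : String) (octave : Int) (scale : String) (degrees : Int) (prefer_sharps : Bool) : List Int :=
  -- Pre_ excludes the inputs where the Python raises (unknown scale / unknown root)
  let current := midi_number root octave
  let pattern := PySem.Dict.getD pvPATTERNS scale []
  let st := (PySem.List.pyRange 2 (degrees + 1) 1).foldl
    (fun (s : Int × List Int × Int) _deg =>
      let cur := s.1 + PySem.List.pyGetD pattern (PySem.Int.mod s.2.2 (pattern.length : Int)) 0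
      (cur, s.2.1 ++ [cur], s.2.2 + 1))
    (current, [current], (0 : Int))
  st.2.1

-- ===== PORT B =====
def pvLETTER : PySem.Dict Char Int := PySem.Dict.ofList
  [('C',0),('D',2),('E',4),('F',5),('G',7),('A',9),('B',11)]

def pvOFFSETS : PySem.Dict String (List Int) := PySem.Dict.ofList
  [("major",[0,2,4,5,7,9,11]),("minorN",[0,2,3,5,7,8,10]),("minorH",[0,2,3,5,7,8,11]),
   ("minorM",[0,2,3,5,7,9,11]),("pentamajor",[0,2,4,7,9]),("pentaminor",[0,3,5,7,10]),
   ("bluesminor",[0,3,5,6,7,10]),("ionian",[0,2,4,5,7,9,11]),("dorian",[0,2,3,5,7,9,10]),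
   ("phrygian",[0,1,3,5,7,8,10]),("lydian",[0,2,4,6,7,9,11]),("mixolydian",[0,2,4,5,7,9,10]),
   ("aeolian",[0,2,3,5,7,8,10]),("locrian",[0,1,3,5,6,8,10])]

def pvRootSemitone (root : String) : Int :=
  let s0 := PySem.Dict.getD pvLETTER ((PySem.Str.pyGet? root 0).getD ' ') 0
  let s := if 1 < PySem.Str.len root then
             s0 + (if (PySem.Str.pyGet? root 1).getD ' ' = '#' then 1 else -1)
           else s0
  PySem.Int.mod s 12

def build_scale_alt (root : String) (octave : Int) (scale : String) (degrees : Int) (prefer_sharps : Bool) : List Int :=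
  let offsets := PySem.Dict.getD pvOFFSETS scale []
  let base := 12 * (octave + 1) + pvRootSemitone root
  let L : Int := offsets.length
  (PySem.List.pyRange 0 (max 1 degrees) 1).map (fun i =>
    base + 12 * PySem.Int.floordiv i L + PySem.List.pyGetD offsets (PySem.Int.mod i L) 0)

-- ===== PRECONDITION & SPEC =====
-- Pre_ is exactly the inputs on which the Python A returns: a known scale name (else ValueError)
-- and a known root note name (else KeyError).
def Pre_build_scale (root : String) (octave : Int) (scale : String) (degrees : Int) (prefer_sharps : Bool) : Prop :=
  PySem.Dict.contains pvPATTERNS scale = true ∧ PySem.Dict.contains pvNAME root = true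
instance (root : String) (octave : Int) (scale : String) (degrees : Int) (prefer_sharps : Bool) : Decidable (Pre_build_scale root octave scale degrees prefer_sharps) := by unfold Pre_build_scale; infer_instance

def pvWitness_build_scale : String × Int × String × Int × Bool := ("C", 4, "major", 8, true)

def Spec_build_scale (root : String) (octave : Int) (scale : String) (degrees : Int) (prefer_sharps : Bool) (out : List Int) : Prop := out = build_scale_alt root octave scale degrees prefer_sharps
instance (root : String) (octave : Int) (scale : String) (degrees : Int) (prefer_sharps : Bool) (out : List Int) : Decidable (Spec_build_scale root octave scale degrees prefer_sharps out) := by unfold Spec_build_scale; infer_instance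

-- ===== CLAIM (what is proved, stated in full; the proofs are below) =====
def Claim_equal_build_scale : Prop := ∀ (root : String) (octave : Int) (scale : String) (degrees : Int) (prefer_sharps : Bool), Dom_build_scale root octave scale degrees prefer_sharps → Pre_build_scale root octave scale degrees prefer_sharps → Spec_build_scale root octave scale degrees prefer_sharps (build_scale root octave scale degrees prefer_sharps)

-- ===== LEMMAS AND PROOFS =====

-- the sequence of note values A produces: g 0 = base, g (k+1) = g k + pattern[k % L]
def gseq (P : List Int) (base : Int) : Nat → Int
  | 0 => base
  | k + 1 => gseq P base k + PySem.List.pyGetD P (PySem.Int.mod (k : Int) (P.length : Int)) 0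

theorem foldlA_invariant (P : List Int) (base : Int) (k : Nat) :
    (PySem.List.pyRange 2 (2 + (k : Int)) 1).foldl
      (fun (s : Int × List Int × Int) _deg =>
        let cur := s.1 + PySem.List.pyGetD P (PySem.Int.mod s.2.2 (P.length : Int)) 0
        (cur, s.2.1 ++ [cur], s.2.2 + 1))
      (base, [base], (0 : Int))
    = (gseq P base k, (List.range (k + 1)).map (gseq P base), (k : Int)) := by
  induction k with
  | zero => simp [PySem.List.pyRange_one_eq_nil, List.range_succ, gseq]
  | succ k ih =>
    have h2 : (2 : Int) + (k + 1 : Nat) = (2 + (k : Int)) + 1 := by push_cast; ring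
    rw [h2, PySem.List.pyRange_one_succ_right (by omega), List.foldl_append, ih]
    simp only [List.foldl_cons, List.foldl_nil]
    refine Prod.ext ?_ (Prod.ext ?_ ?_) <;> simp [gseq, List.range_succ]

theorem buildA_eq_map (P : List Int) (base degrees : Int) :
    (PySem.List.pyRange 2 (degrees + 1) 1).foldl
      (fun (s : Int × List Int × Int) _deg =>
        let cur := s.1 + PySem.List.pyGetD P (PySem.Int.mod s.2.2 (P.length : Int)) 0
        (cur, s.2.1 ++ [cur], s.2.2 + 1))
      (base, [base], (0 : Int)) |>.2.1
    = (List.range (max 1 degrees).toNat).map (gseq P base) := by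
  have hk : PySem.List.pyRange 2 (degrees + 1) 1
      = PySem.List.pyRange 2 (2 + (((max 1 degrees).toNat - 1 : Nat) : Int)) 1 := by
    rcases le_or_gt degrees 1 with h | h
    · rw [PySem.List.pyRange_one_eq_nil (by omega), PySem.List.pyRange_one_eq_nil (by simp; omega)]
    · congr 1; omega
  rw [hk, foldlA_invariant P base ((max 1 degrees).toNat - 1)]
  have : (max 1 degrees).toNat - 1 + 1 = (max 1 degrees).toNat := by omega
  rw [this]

theorem divmod_succ (L q r k : Nat) (hL : 0 < L) (hk : k = L * q + r) (hr : r < L) :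
    (r + 1 < L → (k + 1) / L = q ∧ (k + 1) % L = r + 1) ∧
    (r + 1 = L → (k + 1) / L = q + 1 ∧ (k + 1) % L = 0) := by
  constructor
  · intro h
    subst hk
    have e : L * q + r + 1 = (r + 1) + L * q := by ring
    rw [e, Nat.add_mul_div_left _ _ hL, Nat.div_eq_of_lt h, Nat.zero_add,
        Nat.add_mul_mod_self_left, Nat.mod_eq_of_lt h]
    exact ⟨rfl, rfl⟩
  · intro h
    subst hk
    have e : L * q + r + 1 = (q + 1) * L := by rw [← h]; ring
    rw [e, Nat.mul_div_cancel _ hL, Nat.mul_mod_left]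
    exact ⟨rfl, rfl⟩

theorem gseq_closed (P : List Int) (hP : P ≠ []) (base : Int) (k : Nat) :
    gseq P base k
      = base + ((k / P.length : Nat) : Int) * P.sum + (P.take (k % P.length)).sum := by
  have hL : 0 < P.length := List.length_pos_of_ne_nil hP
  induction k with
  | zero => simp [gseq, Nat.zero_mod]
  | succ k ih =>
    rw [gseq, ih, PySem.Int.mod_natCast]
    have hr : k % P.length < P.length := Nat.mod_lt _ hL
    have hget : PySem.List.pyGetD P ((k % P.length : Nat) : Int) 0 = P[k % P.length] := by
      rw [PySem.List.pyGetD_natCast]; exact List.getD_eq_getElem _ _ hr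
    rw [hget]
    have hdm := divmod_succ P.length (k / P.length) (k % P.length) k hL
      (Nat.div_add_mod k P.length).symm hr
    rcases Nat.lt_or_ge (k % P.length + 1) P.length with hlt | hge
    · obtain ⟨hd, hm⟩ := hdm.1 hlt
      rw [hd, hm, List.sum_take_succ _ _ hr]
      push_cast; ring
    · have heq : k % P.length + 1 = P.length := by omega
      obtain ⟨hd, hm⟩ := hdm.2 heq
      have hPsum : (P.take (k % P.length)).sum + P[k % P.length] = P.sum := by
        rw [← List.sum_take_succ _ _ hr, heq, List.take_length]
      rw [hd, hm]
      push_cast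
      simp only [List.take_zero, List.sum_nil]
      linarith [hPsum]

theorem buildB_eq_map (O : List Int) (base degrees : Int) :
    (PySem.List.pyRange 0 (max 1 degrees) 1).map (fun i =>
      base + 12 * PySem.Int.floordiv i (O.length : Int)
        + PySem.List.pyGetD O (PySem.Int.mod i (O.length : Int)) 0)
    = (List.range (max 1 degrees).toNat).map (fun k =>
        base + 12 * ((k / O.length : Nat) : Int) + O.getD (k % O.length) 0) := by
  rw [PySem.List.pyRange_one, List.map_map]
  simp only [sub_zero]
  apply List.map_congr_left
  intro k _
  simp only [Function.comp_apply, zero_add]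
  rw [PySem.Int.mod_natCast, PySem.Int.floordiv_natCast, PySem.List.pyGetD_natCast]

-- per-scale facts checked by computation: the offsets table is the prefix-sum table of the
-- pattern, the pattern is nonempty and spans exactly 12 semitones
def scaleOK (s : String) : Bool :=
  let P := PySem.Dict.getD pvPATTERNS s []
  let O := PySem.Dict.getD pvOFFSETS s []
  !(decide (P = [])) && decide (O.length = P.length) && decide (P.sum = 12) &&
    (List.range P.length).all (fun r => decide (O.getD r 0 = (P.take r).sum))

theorem scales_ok : ∀ s ∈ PySem.Dict.keys pvPATTERNS, scaleOK s = true := by decide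

theorem roots_ok : ∀ r ∈ PySem.Dict.keys pvNAME, pvRootSemitone r = PySem.Dict.getD pvNAME r 0 := by decide

-- ===== VERDICT (by name: the statement is the Claim_ definition above) =====
theorem build_scale_spec : Claim_equal_build_scale := by
  intro root octave scale degrees prefer_sharps _hdom hpre
  unfold Spec_build_scale build_scale build_scale_alt midi_number
  have hsmem : scale ∈ PySem.Dict.keys pvPATTERNS :=
    (PySem.Dict.contains_iff_mem_keys _ _).mp hpre.1
  have hrmem : root ∈ PySem.Dict.keys pvNAME :=
    (PySem.Dict.contains_iff_mem_keys _ _).mp hpre.2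
  have hOK := scales_ok scale hsmem
  unfold scaleOK at hOK
  simp only [Bool.and_eq_true, Bool.not_eq_true', decide_eq_false_iff_not, decide_eq_true_eq,
    List.all_eq_true, List.mem_range] at hOK
  obtain ⟨⟨⟨hP, hlen⟩, hsum⟩, hoff⟩ := hOK
  have hsem := roots_ok root hrmem
  rw [buildA_eq_map, buildB_eq_map, hsem]
  apply List.map_congr_left
  intro k _
  rw [gseq_closed _ hP, hsum, hlen]
  have hr : k % (PySem.Dict.getD pvPATTERNS scale []).length
      < (PySem.Dict.getD pvPATTERNS scale []).length :=
    Nat.mod_lt _ (List.length_pos_of_ne_nil hP)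
  rw [hoff _ hr]
  ring
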